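-- pv_equiv track=rewrite | github.com/yeongyeongGong/ssafy | algorithm/2.12/두개의숫자.py | solve
-- ===== SOURCE A (Python) =====
-- def solve(arr_A, arr_B):
--     n = 0
--     m = 0
--     a = []
--     b = []
--     max_value = 0
--
--     if len(arr_A) > len(arr_B):     # 어떤 배열이 더 긴지 확인
--         n = len(arr_A)
--         m = len(arr_B)
--         a, b = arr_A, arr_B
--     else:
--         n = len(arr_B)
--         m = len(arr_A)
--         a, b = arr_B, arr_A
--
--     for i in range(n - m + 1):
--         sum_value = 0
--         for j in range(m):
--             sum_value += a[i + j] * b[j]    # 마주보는 숫자곱해서 sum에 넣어주기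
--
--         max_value = max(max_value, sum_value)  # 최댓값
--
--     return max_value  # 결과 반환
-- ===== SOURCE B (Python) =====
-- def solve(arr_A, arr_B):
--     # slide the shorter list along the suffixes of the longer one; dot product via zip
--     if len(arr_A) > len(arr_B):
--         a, b = arr_A, arr_B
--     else:
--         a, b = arr_B, arr_A
--     best = 0
--     t = a
--     while True:
--         s = sum(x * y for x, y in zip(t, b))
--         if s > best:
--             best = s
--         if len(t) <= len(b):
--             return best
--         t = t[1:]
-- ===== Notes on version B (the rewrite author's own statement) =====
-- stated objective: simpler
-- what changed: B replaces A's index-arithmetic double loop (range(n-m+1) x range(m) with a[i+j]*b[j]) by sliding the shorter list over the suffixes of the longer one, computing each dot product with zip and keeping a running best.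
import Mathlib
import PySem

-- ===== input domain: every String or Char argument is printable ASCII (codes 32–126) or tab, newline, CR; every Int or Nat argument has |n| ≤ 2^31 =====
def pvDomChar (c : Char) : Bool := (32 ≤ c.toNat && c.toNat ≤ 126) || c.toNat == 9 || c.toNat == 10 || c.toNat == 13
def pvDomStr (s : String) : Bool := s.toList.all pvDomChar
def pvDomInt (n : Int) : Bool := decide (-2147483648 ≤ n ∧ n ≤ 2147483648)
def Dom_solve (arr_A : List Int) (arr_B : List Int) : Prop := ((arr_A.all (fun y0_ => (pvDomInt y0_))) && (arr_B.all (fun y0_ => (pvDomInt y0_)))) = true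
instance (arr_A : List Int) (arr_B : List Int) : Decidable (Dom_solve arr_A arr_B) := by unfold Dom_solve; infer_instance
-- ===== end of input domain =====

-- B slides the shorter list over the suffixes of the longer one with zip dot products
-- instead of A's index-arithmetic double loop; same result, proved equal on all inputs.

-- ===== PORT A =====
-- a[i+j] / b[j]: the loop bounds keep both indices in range, so Python never raises;
-- pyGet? … |>.getD 0 is exact there (the default is never taken).
def solve (arr_A : List Int) (arr_B : List Int) : Int :=
  let (n, m, a, b) :=
    if arr_A.length > arr_B.length then
      ((arr_A.length : Int), (arr_B.length : Int), arr_A, arr_B)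
    else
      ((arr_B.length : Int), (arr_A.length : Int), arr_B, arr_A)
  (PySem.List.pyRange 0 (n - m + 1) 1).foldl
    (fun max_value i =>
      let sum_value := (PySem.List.pyRange 0 m 1).foldl
        (fun s j => s + (PySem.List.pyGet? a (i + j)).getD 0 * (PySem.List.pyGet? b j).getD 0) 0
      max max_value sum_value) 0

-- ===== PORT B =====
-- the 'while True' loop of Source B: t runs over suffixes (t = t[1:]), dot product via zip
def solveAltGo (b : List Int) (t : List Int) (best : Int) : Int :=
  let s := ((List.zip t b).map (fun p => p.1 * p.2)).sum
  let best' := if s > best then s else best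
  if t.length ≤ b.length then best'
  else solveAltGo b (t.drop 1) best'
termination_by t.length
decreasing_by simp; omega

def solve_alt (arr_A : List Int) (arr_B : List Int) : Int :=
  let (a, b) :=
    if arr_A.length > arr_B.length then (arr_A, arr_B) else (arr_B, arr_A)
  solveAltGo b a 0

-- ===== PRECONDITION & SPEC =====
def Spec_solve (arr_A : List Int) (arr_B : List Int) (out : Int) : Prop := out = solve_alt arr_A arr_B
instance (arr_A : List Int) (arr_B : List Int) (out : Int) : Decidable (Spec_solve arr_A arr_B out) := by unfold Spec_solve; infer_instance

-- ===== CLAIM (what is proved, stated in full; the proofs are below) =====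
def Claim_equal_solve : Prop := ∀ (arr_A : List Int) (arr_B : List Int), Dom_solve arr_A arr_B → Spec_solve arr_A arr_B (solve arr_A arr_B)

-- ===== LEMMAS AND PROOFS =====

-- dot product of b against the suffix of a starting at i
def dotAt (a b : List Int) (i : Nat) : Int :=
  (((a.drop i).zip b).map (fun p => p.1 * p.2)).sum

-- common normal form: running max over all offsets
def spec (a b : List Int) (best : Int) : Int :=
  (List.range (a.length - b.length + 1)).foldl (fun acc i => max acc (dotAt a b i)) best

lemma dotAt_succ (a b : List Int) (i : Nat) :
    dotAt a b (i + 1) = dotAt (a.drop 1) b i := by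
  simp [dotAt]

lemma innerSum (a b : List Int) (i : Nat) (h : i + b.length ≤ a.length) :
    ((List.range b.length).map (fun k => a.getD (i + k) 0 * b.getD k 0)).sum = dotAt a b i := by
  induction b generalizing i with
  | nil => simp [dotAt]
  | cons x bs ih =>
      have hi : i < a.length := by simp at h; omega
      have h' : (i + 1) + bs.length ≤ a.length := by simp at h; omega
      simp only [List.length_cons]
      rw [List.range_succ_eq_map]
      simp only [List.map_cons, List.map_map, List.sum_cons, Function.comp_def, Nat.succ_eq_add_one]
      have hmap : ((List.range bs.length).map (fun k => a.getD (i + (k + 1)) 0 * (x :: bs).getD (k + 1) 0)).sum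
           = ((List.range bs.length).map (fun k => a.getD ((i + 1) + k) 0 * bs.getD k 0)).sum := by
        congr 1
        apply List.map_congr_left
        intro k _
        have hik : i + (k + 1) = (i + 1) + k := by omega
        rw [hik]
        rfl
      rw [hmap, ih (i + 1) h']
      simp only [dotAt]
      conv_rhs => rw [List.drop_eq_getElem_cons hi, List.zip_cons_cons, List.map_cons, List.sum_cons]
      simp [List.getD_eq_getElem?_getD, List.getElem?_eq_getElem hi]

lemma spec_shift (t b : List Int) (best : Int) (h : b.length < t.length) :
    spec t b best = spec (t.drop 1) b (max best (dotAt t b 0)) := by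
  unfold spec
  have hk : t.length - b.length + 1 = ((t.drop 1).length - b.length + 1) + 1 := by simp; omega
  rw [hk, List.range_succ_eq_map, List.foldl_cons, List.foldl_map]
  apply PySem.List.foldl_congr_mem
  intro acc i _
  rw [dotAt_succ]

lemma goB_eq (b : List Int) (t : List Int) (best : Int) (h : b.length ≤ t.length) :
    solveAltGo b t best = spec t b best := by
  have hd0 : ((t.zip b).map (fun p => p.1 * p.2)).sum = dotAt t b 0 := by simp [dotAt]
  have hbest : (if ((t.zip b).map (fun p => p.1 * p.2)).sum > best
                then ((t.zip b).map (fun p => p.1 * p.2)).sum else best)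
             = max best (dotAt t b 0) := by
    rw [hd0]
    by_cases hgt : dotAt t b 0 > best
    · rw [if_pos hgt, max_eq_right (le_of_lt hgt)]
    · rw [if_neg hgt, max_eq_left (not_lt.mp hgt)]
  by_cases hle : t.length ≤ b.length
  · have heq : t.length = b.length := le_antisymm hle h
    rw [solveAltGo]
    simp only [hle, if_true]
    have h1 : t.length - b.length + 1 = 1 := by omega
    rw [hbest]
    simp [spec, h1, List.range_succ]
  · rw [not_le] at hle
    have h1 : b.length ≤ (t.drop 1).length := by simp; omega
    rw [solveAltGo]
    simp only [not_le.mpr hle, if_false]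
    rw [hbest, goB_eq b (t.drop 1) _ h1, spec_shift t b best hle]
termination_by t.length
decreasing_by simp; omega

lemma aLoop_eq (a b : List Int) (h : b.length ≤ a.length) :
    (PySem.List.pyRange 0 ((a.length : Int) - (b.length : Int) + 1) 1).foldl
      (fun max_value i =>
        max max_value
          ((PySem.List.pyRange 0 (b.length : Int) 1).foldl
            (fun s j => s + (PySem.List.pyGet? a (i + j)).getD 0 * (PySem.List.pyGet? b j).getD 0) 0))
      0
    = spec a b 0 := by
  simp only [PySem.List.pyRange_one]
  have hK : ((a.length : Int) - (b.length : Int) + 1 - 0).toNat = a.length - b.length + 1 := by omega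
  have hm : ((b.length : Int) - 0).toNat = b.length := by omega
  simp only [hK, hm, zero_add]
  rw [List.foldl_map]
  unfold spec
  apply PySem.List.foldl_congr_mem
  intro acc i hi
  have hi' : i < a.length - b.length + 1 := List.mem_range.mp hi
  congr 1
  rw [List.foldl_map, PySem.List.foldl_add, zero_add]
  rw [← innerSum a b i (by omega)]
  congr 1
  apply List.map_congr_left
  intro k _
  have hik : (i : Int) + (k : Int) = ((i + k : Nat) : Int) := by push_cast; ring
  simp only [hik, PySem.List.pyGet?_natCast]
  simp [List.getD_eq_getElem?_getD]

-- ===== VERDICT (by name: the statement is the Claim_ definition above) =====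
theorem solve_spec : Claim_equal_solve := by
  intro arr_A arr_B _
  unfold Spec_solve solve solve_alt
  by_cases hc : arr_A.length > arr_B.length
  · simp only [hc, if_true]
    rw [aLoop_eq arr_A arr_B (le_of_lt hc), goB_eq arr_B arr_A 0 (le_of_lt hc)]
  · simp only [hc, if_false]
    have h : arr_A.length ≤ arr_B.length := not_lt.mp hc
    rw [aLoop_eq arr_B arr_A h, goB_eq arr_A arr_B 0 h]
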